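-- pv_equiv track=rewrite | github.com/yulaomao/udp------ | decode_roi_records.py | fill_vertical_gaps
-- ===== SOURCE A (Python) =====
-- VERTICAL_GAP = 2
--
-- def fill_vertical_gaps(mask: list[list[int]], max_gap: int = VERTICAL_GAP) -> list[list[int]]:
--     height = len(mask)
--     width = len(mask[0]) if height else 0
--     output = [row[:] for row in mask]
--
--     for x in range(width):
--         active_rows = [y for y in range(height) if mask[y][x]]
--         for first_row, second_row in zip(active_rows, active_rows[1:]):
--             if 1 < second_row - first_row <= max_gap + 1:
--                 for y in range(first_row + 1, second_row):
--                     output[y][x] = 1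
--
--     return output
-- ===== SOURCE B (Python) =====
-- VERTICAL_GAP = 2
--
-- def fill_vertical_gaps(mask: list[list[int]], max_gap: int = VERTICAL_GAP) -> list[list[int]]:
--     # Row-major sweep with a per-column last-active array: when a column becomes
--     # active again after a small gap, fill the rows of that gap in the output.
--     height = len(mask)
--     width = len(mask[0]) if height else 0
--     output = [row[:] for row in mask]
--     last_active = [-1] * width
--
--     for y in range(height):
--         row = mask[y]
--         for x in range(width):
--             if row[x]:
--                 prev = last_active[x]
--                 if prev >= 0 and 1 < y - prev <= max_gap + 1:
--                     for yy in range(prev + 1, y):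
--                         output[yy][x] = 1
--                 last_active[x] = y
--
--     return output
-- ===== Notes on version B (the rewrite author's own statement) =====
-- stated objective: alternative
-- what changed: Replaces A's column-major pass (build the full list of active rows per column, zip consecutive pairs, then fill) by a single row-major sweep that maintains a per-column last-active array and fills each small gap the moment the column turns active again (no intermediate active-row lists); Pre_ excludes only masks with a row shorter than the first row, on which both programs raise IndexError.
import Mathlib
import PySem

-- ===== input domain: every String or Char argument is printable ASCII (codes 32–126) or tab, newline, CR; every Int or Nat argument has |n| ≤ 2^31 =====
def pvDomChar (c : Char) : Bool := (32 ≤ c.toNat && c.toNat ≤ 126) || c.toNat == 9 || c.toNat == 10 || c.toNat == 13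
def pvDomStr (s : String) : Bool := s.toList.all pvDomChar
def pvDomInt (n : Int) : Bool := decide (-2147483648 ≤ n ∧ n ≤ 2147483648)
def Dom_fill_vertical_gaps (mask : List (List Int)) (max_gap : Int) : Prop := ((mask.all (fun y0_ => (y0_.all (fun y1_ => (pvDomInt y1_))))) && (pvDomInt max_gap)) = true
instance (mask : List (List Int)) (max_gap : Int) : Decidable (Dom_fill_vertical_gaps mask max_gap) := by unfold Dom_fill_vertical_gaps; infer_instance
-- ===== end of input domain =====

-- B replaces A's column-major pass (per column: list of active rows, zip of
-- consecutive pairs, fill) by a single row-major sweep maintaining a per-column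
-- last-active array, filling a gap the moment its column turns active again.
-- Objective: alternative (no speed claim).

-- ===== PORT A =====
-- output[y][x] = 1  (y, x always in range when A executes it)
def pvWrite (out : List (List Int)) (y x : Nat) : List (List Int) :=
  out.modify y (fun r => r.set x 1)

-- width = len(mask[0]) if mask else 0  (shared by both ports)
def pvWidth (mask : List (List Int)) : Nat := match mask with | [] => 0 | r :: _ => r.length

-- literal port of A: copy, then per column collect active rows, zip consecutive pairs,
-- fill strictly-between rows of close-enough pairs.  list indexing is ported with getD:
-- exact on Pre_ (all indices used are then in range).
def fill_vertical_gaps (mask : List (List Int)) (max_gap : Int) : List (List Int) :=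
  let height := mask.length
  let width := pvWidth mask
  let output := mask          -- [row[:] for row in mask]: a copy, identity on values
  (List.range width).foldl (fun output x =>
    let active_rows := (List.range height).filter (fun y => (mask.getD y []).getD x 0 != 0)
    (active_rows.zip active_rows.tail).foldl (fun output p =>
      if 1 < (p.2 : Int) - (p.1 : Int) ∧ (p.2 : Int) - (p.1 : Int) ≤ max_gap + 1 then
        (List.range' (p.1 + 1) (p.2 - p.1 - 1)).foldl (fun output y => pvWrite output y x) output
      else output) output) output

-- ===== PORT B =====
-- body of Source B's inner loop: state = (output, last_active); one column x of row y
def pvBStepX (row : List Int) (g : Int) (y : Nat)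
    (s : List (List Int) × List Int) (x : Nat) : List (List Int) × List Int :=
  if row.getD x 0 != 0 then
    let prev := s.2.getD x (-1)
    let out := if 0 ≤ prev ∧ 1 < (y : Int) - prev ∧ (y : Int) - prev ≤ g + 1 then
        (List.range' (prev.toNat + 1) (y - prev.toNat - 1)).foldl (fun o yy => pvWrite o yy x) s.1
      else s.1
    (out, s.2.set x (y : Int))
  else s

-- one row y of Source B's sweep: row = mask[y]; for x in range(width): …
def pvBStepY (mask : List (List Int)) (g : Int)
    (s : List (List Int) × List Int) (y : Nat) : List (List Int) × List Int :=
  (List.range (pvWidth mask)).foldl (pvBStepX (mask.getD y []) g y) s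

-- literal port of B: row-major sweep over (output, last_active), return output
def fill_vertical_gaps_alt (mask : List (List Int)) (max_gap : Int) : List (List Int) :=
  ((List.range mask.length).foldl (pvBStepY mask max_gap)
    (mask, List.replicate (pvWidth mask) (-1))).1

-- ===== PRECONDITION & SPEC =====
-- Pre_ is exactly A's return domain: A raises IndexError iff some row is shorter than
-- the first row (it reads mask[y][x] for every x < len(mask[0])); B raises there too.
def Pre_fill_vertical_gaps (mask : List (List Int)) (max_gap : Int) : Prop :=
  ∀ row ∈ mask, (match mask with | [] => 0 | r :: _ => r.length) ≤ row.length
instance (mask : List (List Int)) (max_gap : Int) : Decidable (Pre_fill_vertical_gaps mask max_gap) := by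
  unfold Pre_fill_vertical_gaps; infer_instance
def pvWitness_fill_vertical_gaps : List (List Int) × Int := ([[1, 0, 1], [0, 0, 0], [1, 0, 1]], 2)

def Spec_fill_vertical_gaps (mask : List (List Int)) (max_gap : Int) (out : List (List Int)) : Prop := out = fill_vertical_gaps_alt mask max_gap
instance (mask : List (List Int)) (max_gap : Int) (out : List (List Int)) : Decidable (Spec_fill_vertical_gaps mask max_gap out) := by unfold Spec_fill_vertical_gaps; infer_instance

-- ===== CLAIM (what is proved, stated in full; the proofs are below) =====
def Claim_equal_fill_vertical_gaps : Prop := ∀ (mask : List (List Int)) (max_gap : Int), Dom_fill_vertical_gaps mask max_gap → Pre_fill_vertical_gaps mask max_gap → Spec_fill_vertical_gaps mask max_gap (fill_vertical_gaps mask max_gap)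

-- ===== LEMMAS AND PROOFS =====

-- cell of the current output matrix (0 / [] defaults; all uses are in range)
def pvCell (out : List (List Int)) (y x : Nat) : Int := (out.getD y []).getD x 0

-- length of row y
def pvRows (out : List (List Int)) (y : Nat) : Nat := (out.getD y []).length

-- "row y is active in column x"
def pvAct (mask : List (List Int)) (x y : Nat) : Bool := (mask.getD y []).getD x 0 != 0

-- the consecutive-pairs list A builds for column x
def pvPairs (mask : List (List Int)) (x : Nat) : List (Nat × Nat) :=
  let active := (List.range mask.length).filter (fun y => (mask.getD y []).getD x 0 != 0)
  active.zip active.tail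

def pvStepPair (max_gap : Int) (x : Nat) (output : List (List Int)) (p : Nat × Nat) : List (List Int) :=
  if 1 < (p.2 : Int) - (p.1 : Int) ∧ (p.2 : Int) - (p.1 : Int) ≤ max_gap + 1 then
    (List.range' (p.1 + 1) (p.2 - p.1 - 1)).foldl (fun output y => pvWrite output y x) output
  else output

def pvStepCol (mask : List (List Int)) (max_gap : Int) (output : List (List Int)) (x : Nat) : List (List Int) :=
  let active_rows := (List.range mask.length).filter (fun y => (mask.getD y []).getD x 0 != 0)
  (active_rows.zip active_rows.tail).foldl (pvStepPair max_gap x) output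

theorem pv_fill_eq (mask : List (List Int)) (max_gap : Int) :
    fill_vertical_gaps mask max_gap =
      (List.range (pvWidth mask)).foldl (pvStepCol mask max_gap) mask := rfl

theorem pv_set_getD {α : Type} (r : List α) (x x' : Nat) (v d : α) :
    (r.set x v).getD x' d = if x' = x ∧ x < r.length then v else r.getD x' d := by
  by_cases hx : x' = x
  · subst hx
    by_cases hl : x' < r.length
    · simp [List.getD_eq_getElem?_getD, hl]
    · simp [List.getD_eq_getElem?_getD, hl]
  · simp [List.getD_eq_getElem?_getD, Ne.symm hx, hx]

theorem pv_write_getD (out : List (List Int)) (y x y' : Nat) :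
    (pvWrite out y x).getD y' [] = if y' = y then (out.getD y []).set x 1 else out.getD y' [] := by
  by_cases hy : y' = y
  · subst hy
    rcases h : out[y']? with _ | r
    · simp [pvWrite, List.getD_eq_getElem?_getD, h]
    · simp [pvWrite, List.getD_eq_getElem?_getD, h]
  · simp [pvWrite, List.getD_eq_getElem?_getD, hy, Ne.symm hy]

theorem pv_write_cell (out : List (List Int)) (y x y' x' : Nat) :
    pvCell (pvWrite out y x) y' x' =
      if y' = y ∧ x' = x ∧ x < pvRows out y then 1 else pvCell out y' x' := by
  unfold pvCell pvRows
  rw [pv_write_getD]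
  by_cases hy : y' = y
  · subst hy
    rw [if_pos rfl, pv_set_getD]
    by_cases h : x' = x ∧ x < (out.getD y' []).length
    · rw [if_pos h, if_pos ⟨rfl, h.1, h.2⟩]
    · rw [if_neg h, if_neg (fun hc => h ⟨hc.2.1, hc.2.2⟩)]
  · rw [if_neg hy, if_neg (fun hc => hy hc.1)]

theorem pv_write_rows (out : List (List Int)) (y x y' : Nat) :
    pvRows (pvWrite out y x) y' = pvRows out y' := by
  unfold pvRows
  rw [pv_write_getD]
  by_cases hy : y' = y <;> simp [hy]

theorem pv_rfold_cell (x y' x' : Nat) :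
    ∀ (n s : Nat) (out : List (List Int)),
      pvCell ((List.range' s n).foldl (fun o yy => pvWrite o yy x) out) y' x' =
        if x' = x ∧ s ≤ y' ∧ y' < s + n ∧ x < pvRows out y' then 1 else pvCell out y' x' := by
  intro n
  induction n with
  | zero => intro s out; simp [List.range']; intro h; omega
  | succ n ih =>
    intro s out
    have hrows : pvRows (pvWrite out s x) y' = pvRows out y' := pv_write_rows _ _ _ _
    rw [List.range'_succ, List.foldl_cons, ih, hrows, pv_write_cell]
    by_cases h1 : x' = x
    · subst h1
      by_cases hys : y' = s
      · subst hys
        rw [if_neg (by omega)]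
        by_cases hx : x' < pvRows out y'
        · rw [if_pos ⟨rfl, rfl, hx⟩, if_pos ⟨rfl, le_refl _, by omega, hx⟩]
        · rw [if_neg (fun hc => hx hc.2.2), if_neg (fun hc => hx hc.2.2.2)]
      · by_cases h2 : s + 1 ≤ y' ∧ y' < s + 1 + n ∧ x' < pvRows out y'
        · rw [if_pos ⟨rfl, h2.1, h2.2.1, h2.2.2⟩, if_pos ⟨rfl, by omega, by omega, h2.2.2⟩]
        · rw [if_neg (fun hc => h2 ⟨hc.2.1, hc.2.2.1, hc.2.2.2⟩), if_neg (fun hc => hys hc.1)]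
          rw [if_neg]
          intro hc
          exact h2 ⟨by omega, by have := hc.2.2.1; omega, hc.2.2.2⟩
    · rw [if_neg (fun hc => h1 hc.1), if_neg (fun hc => h1 hc.2.1), if_neg (fun hc => h1 hc.1)]

theorem pv_rfold_rows (x : Nat) :
    ∀ (n s : Nat) (out : List (List Int)) (y' : Nat),
      pvRows ((List.range' s n).foldl (fun o yy => pvWrite o yy x) out) y' = pvRows out y' := by
  intro n
  induction n with
  | zero => intro s out y'; simp [List.range']
  | succ n ih =>
    intro s out y'
    rw [List.range'_succ, List.foldl_cons, ih, pv_write_rows]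

theorem pv_rfold_len (x : Nat) :
    ∀ (n s : Nat) (out : List (List Int)),
      ((List.range' s n).foldl (fun o yy => pvWrite o yy x) out).length = out.length := by
  intro n
  induction n with
  | zero => intro s out; simp [List.range']
  | succ n ih =>
    intro s out
    rw [List.range'_succ, List.foldl_cons, ih]
    simp [pvWrite]

theorem pv_steppair_cell (g : Int) (x y' x' : Nat) (out : List (List Int)) (p : Nat × Nat) :
    pvCell (pvStepPair g x out p) y' x' =
      if x' = x ∧ ((1 < (p.2 : Int) - (p.1 : Int) ∧ (p.2 : Int) - (p.1 : Int) ≤ g + 1) ∧ p.1 < y' ∧ y' < p.2) ∧ x < pvRows out y'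
      then 1 else pvCell out y' x' := by
  unfold pvStepPair
  by_cases hc : 1 < (p.2 : Int) - (p.1 : Int) ∧ (p.2 : Int) - (p.1 : Int) ≤ g + 1
  · rw [if_pos hc, pv_rfold_cell]
    have h12 : p.1 + 2 ≤ p.2 := by
      have := hc.1; omega
    refine if_congr ⟨fun h => ⟨h.1, ⟨hc, by omega, by have := h.2.2.1; omega⟩, h.2.2.2⟩,
      fun h => ⟨h.1, by have := h.2.1.2.1; omega, by have := h.2.1.2.2; omega, h.2.2⟩⟩ rfl rfl
  · rw [if_neg hc, if_neg (fun h => hc h.2.1.1)]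

theorem pv_steppair_rows (g : Int) (x : Nat) (out : List (List Int)) (p : Nat × Nat) (y' : Nat) :
    pvRows (pvStepPair g x out p) y' = pvRows out y' := by
  unfold pvStepPair
  split
  · exact pv_rfold_rows _ _ _ _ _
  · rfl

theorem pv_steppair_len (g : Int) (x : Nat) (out : List (List Int)) (p : Nat × Nat) :
    (pvStepPair g x out p).length = out.length := by
  unfold pvStepPair
  split
  · exact pv_rfold_len _ _ _ _
  · rfl

theorem pv_pfold_cell (g : Int) (x y' x' : Nat) :
    ∀ (L : List (Nat × Nat)) (out : List (List Int)),
      pvCell (List.foldl (pvStepPair g x) out L) y' x' =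
        if x' = x ∧ (∃ p ∈ L, (1 < (p.2 : Int) - (p.1 : Int) ∧ (p.2 : Int) - (p.1 : Int) ≤ g + 1) ∧ p.1 < y' ∧ y' < p.2) ∧ x < pvRows out y'
        then 1 else pvCell out y' x' := by
  intro L
  induction L with
  | nil => intro out; simp
  | cons p L ih =>
    intro out
    rw [List.foldl_cons, ih, pv_steppair_rows, pv_steppair_cell]
    by_cases hx : x' = x
    · subst hx
      by_cases hr : x' < pvRows out y'
      · by_cases hL : ∃ q ∈ L, (1 < (q.2 : Int) - (q.1 : Int) ∧ (q.2 : Int) - (q.1 : Int) ≤ g + 1) ∧ q.1 < y' ∧ y' < q.2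
        · rcases hL with ⟨q, hqL, hq⟩
          rw [if_pos ⟨rfl, ⟨q, hqL, hq⟩, hr⟩, if_pos ⟨rfl, ⟨q, List.mem_cons_of_mem _ hqL, hq⟩, hr⟩]
        · rw [if_neg (fun h => hL h.2.1)]
          by_cases hp : (1 < (p.2 : Int) - (p.1 : Int) ∧ (p.2 : Int) - (p.1 : Int) ≤ g + 1) ∧ p.1 < y' ∧ y' < p.2
          · rw [if_pos ⟨rfl, hp, hr⟩, if_pos ⟨rfl, ⟨p, List.mem_cons_self, hp⟩, hr⟩]
          · rw [if_neg (fun h => hp h.2.1), if_neg]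
            intro h
            rcases h.2.1 with ⟨q, hqm, hq⟩
            rcases List.mem_cons.mp hqm with rfl | hqL
            · exact hp hq
            · exact hL ⟨q, hqL, hq⟩
      · rw [if_neg (fun h => hr h.2.2), if_neg (fun h => hr h.2.2), if_neg (fun h => hr h.2.2)]
    · rw [if_neg (fun h => hx h.1), if_neg (fun h => hx h.1), if_neg (fun h => hx h.1)]

theorem pv_pfold_rows (g : Int) (x : Nat) :
    ∀ (L : List (Nat × Nat)) (out : List (List Int)) (y' : Nat),
      pvRows (List.foldl (pvStepPair g x) out L) y' = pvRows out y' := by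
  intro L
  induction L with
  | nil => intro out y'; rfl
  | cons p L ih =>
    intro out y'
    rw [List.foldl_cons, ih, pv_steppair_rows]

theorem pv_pfold_len (g : Int) (x : Nat) :
    ∀ (L : List (Nat × Nat)) (out : List (List Int)),
      (List.foldl (pvStepPair g x) out L).length = out.length := by
  intro L
  induction L with
  | nil => intro out; rfl
  | cons p L ih =>
    intro out
    rw [List.foldl_cons, ih, pv_steppair_len]

theorem pv_colstep_cell (mask : List (List Int)) (g : Int) (x y' x' : Nat) (out : List (List Int))
    (hrows : ∀ y, pvRows out y = pvRows mask y) :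
    pvCell (pvStepCol mask g out x) y' x' =
      if x' = x ∧ (∃ p ∈ pvPairs mask x, (1 < (p.2 : Int) - (p.1 : Int) ∧ (p.2 : Int) - (p.1 : Int) ≤ g + 1) ∧ p.1 < y' ∧ y' < p.2) ∧ x < pvRows mask y'
      then 1 else pvCell out y' x' := by
  unfold pvStepCol pvPairs
  rw [pv_pfold_cell, hrows]

theorem pv_colstep_rows (mask : List (List Int)) (g : Int) (x : Nat) (out : List (List Int)) (y' : Nat) :
    pvRows (pvStepCol mask g out x) y' = pvRows out y' := by
  unfold pvStepCol
  exact pv_pfold_rows _ _ _ _ _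

theorem pv_colstep_len (mask : List (List Int)) (g : Int) (x : Nat) (out : List (List Int)) :
    (pvStepCol mask g out x).length = out.length := by
  unfold pvStepCol
  exact pv_pfold_len _ _ _ _

theorem pv_ofold_cell (mask : List (List Int)) (g : Int) (y' x' : Nat) :
    ∀ (xs : List Nat) (out : List (List Int)), (∀ y, pvRows out y = pvRows mask y) →
      pvCell (xs.foldl (pvStepCol mask g) out) y' x' =
        if x' ∈ xs ∧ (∃ p ∈ pvPairs mask x', (1 < (p.2 : Int) - (p.1 : Int) ∧ (p.2 : Int) - (p.1 : Int) ≤ g + 1) ∧ p.1 < y' ∧ y' < p.2) ∧ x' < pvRows mask y'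
        then 1 else pvCell out y' x' := by
  intro xs
  induction xs with
  | nil => intro out h; simp
  | cons x xs ih =>
    intro out hrows
    rw [List.foldl_cons, ih _ (fun y => by rw [pv_colstep_rows]; exact hrows y), pv_colstep_cell _ _ _ _ _ _ hrows]
    by_cases hW : (∃ p ∈ pvPairs mask x', (1 < (p.2 : Int) - (p.1 : Int) ∧ (p.2 : Int) - (p.1 : Int) ≤ g + 1) ∧ p.1 < y' ∧ y' < p.2) ∧ x' < pvRows mask y'
    · by_cases hm : x' ∈ xs
      · rw [if_pos ⟨hm, hW⟩, if_pos ⟨List.mem_cons_of_mem _ hm, hW⟩]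
      · rw [if_neg (fun h => hm h.1)]
        by_cases hx : x' = x
        · subst hx
          rw [if_pos ⟨rfl, hW⟩, if_pos ⟨List.mem_cons_self, hW⟩]
        · rw [if_neg (fun h => hx h.1), if_neg]
          intro h
          rcases List.mem_cons.mp h.1 with rfl | hm'
          · exact hx rfl
          · exact hm hm'
    · have hmid : ¬ (x' = x ∧ (∃ p ∈ pvPairs mask x, (1 < (p.2 : Int) - (p.1 : Int) ∧ (p.2 : Int) - (p.1 : Int) ≤ g + 1) ∧ p.1 < y' ∧ y' < p.2) ∧ x < pvRows mask y') := by
        rintro ⟨rfl, hw, hr⟩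
        exact hW ⟨hw, hr⟩
      rw [if_neg (fun h => hW h.2), if_neg hmid, if_neg (fun h => hW h.2)]

theorem pv_ofold_rows (mask : List (List Int)) (g : Int) :
    ∀ (xs : List Nat) (out : List (List Int)) (y' : Nat),
      pvRows (xs.foldl (pvStepCol mask g) out) y' = pvRows out y' := by
  intro xs
  induction xs with
  | nil => intro out y'; rfl
  | cons x xs ih =>
    intro out y'
    rw [List.foldl_cons, ih, pv_colstep_rows]

theorem pv_ofold_len (mask : List (List Int)) (g : Int) :
    ∀ (xs : List Nat) (out : List (List Int)),
      (xs.foldl (pvStepCol mask g) out).length = out.length := by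
  intro xs
  induction xs with
  | nil => intro out; rfl
  | cons x xs ih =>
    intro out
    rw [List.foldl_cons, ih, pv_colstep_len]

theorem pv_getD_getElem {α : Type} (l : List α) (d : α) (i : Nat) (h : i < l.length) :
    l.getD i d = l[i] := by
  rw [List.getD_eq_getElem?_getD, List.getElem?_eq_getElem h]
  rfl

theorem pv_A_len (mask : List (List Int)) (g : Int) :
    (fill_vertical_gaps mask g).length = mask.length := by
  rw [pv_fill_eq]
  exact pv_ofold_len _ _ _ _

theorem pv_A_rows (mask : List (List Int)) (g : Int) (y : Nat) :
    pvRows (fill_vertical_gaps mask g) y = pvRows mask y := by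
  rw [pv_fill_eq]
  exact pv_ofold_rows _ _ _ _ _

theorem pv_A_cell (mask : List (List Int)) (g : Int) (y x : Nat) :
    pvCell (fill_vertical_gaps mask g) y x =
      if x < pvWidth mask ∧
          (∃ p ∈ pvPairs mask x, (1 < (p.2 : Int) - (p.1 : Int) ∧ (p.2 : Int) - (p.1 : Int) ≤ g + 1) ∧ p.1 < y ∧ y < p.2) ∧
          x < pvRows mask y
      then 1 else pvCell mask y x := by
  rw [pv_fill_eq, pv_ofold_cell mask g y x _ mask (fun _ => rfl)]
  exact if_congr (by rw [List.mem_range]) rfl rfl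

theorem pv_sorted_head_le {a : Nat} {l : List Nat} (h : (a :: l).Pairwise (· < ·)) :
    ∀ c ∈ a :: l, a ≤ c := by
  intro c hc
  rcases List.mem_cons.mp hc with rfl | hc
  · exact le_refl c
  · exact ((List.pairwise_cons.mp h).1 c hc).le

theorem pv_zip_adj : ∀ {l : List Nat}, l.Pairwise (· < ·) → ∀ {a b : Nat},
    ((a, b) ∈ l.zip l.tail ↔ a ∈ l ∧ b ∈ l ∧ a < b ∧ ∀ c ∈ l, ¬(a < c ∧ c < b)) := by
  intro l
  induction l with
  | nil => intro _ a b; simp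
  | cons x xs ih =>
    intro hp a b
    rcases List.pairwise_cons.mp hp with ⟨hxlt, hptail⟩
    cases xs with
    | nil =>
      simp only [List.tail_cons, List.zip_nil_right, List.not_mem_nil, false_iff]
      rintro ⟨ha, hb, hab, -⟩
      rcases List.mem_singleton.mp ha with rfl
      rcases List.mem_singleton.mp hb with rfl
      omega
    | cons y ys =>
      have hzip : (x :: y :: ys).zip (x :: y :: ys).tail = (x, y) :: ((y :: ys).zip (y :: ys).tail) := rfl
      rw [hzip]
      constructor
      · intro hmem
        rcases List.mem_cons.mp hmem with heq | hmem'
        · cases heq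
          refine ⟨List.mem_cons_self, List.mem_cons_of_mem _ List.mem_cons_self,
            hxlt b List.mem_cons_self, ?_⟩
          intro c hc
          rcases List.mem_cons.mp hc with rfl | hc'
          · omega
          · have := pv_sorted_head_le hptail c hc'
            omega
        · rcases (ih hptail).mp hmem' with ⟨ha, hb, hab, hnb⟩
          refine ⟨List.mem_cons_of_mem _ ha, List.mem_cons_of_mem _ hb, hab, ?_⟩
          intro c hc
          rcases List.mem_cons.mp hc with rfl | hc'
          · have := hxlt a ha
            omega
          · exact hnb c hc'
      · rintro ⟨ha, hb, hab, hnb⟩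
        rcases List.mem_cons.mp ha with rfl | ha'
        · have hb' : b ∈ y :: ys := by
            rcases List.mem_cons.mp hb with rfl | hb'
            · omega
            · exact hb'
          have hyb : y ≤ b := pv_sorted_head_le hptail b hb'
          have hay : a < y := hxlt y List.mem_cons_self
          have hbey : b = y := by
            by_contra hne
            exact hnb y (List.mem_cons_of_mem _ List.mem_cons_self) ⟨hay, by omega⟩
          subst hbey
          exact List.mem_cons_self
        · have hb' : b ∈ y :: ys := by
            rcases List.mem_cons.mp hb with rfl | hb'
            · have := hxlt a ha'
              omega
            · exact hb'
          exact List.mem_cons_of_mem _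
            ((ih hptail).mpr ⟨ha', hb', hab, fun c hc => hnb c (List.mem_cons_of_mem _ hc)⟩)

theorem pv_mem_active (mask : List (List Int)) (x c : Nat) :
    c ∈ (List.range mask.length).filter (fun y => (mask.getD y []).getD x 0 != 0) ↔
      c < mask.length ∧ pvAct mask x c = true := by
  simp [List.mem_filter, List.mem_range, pvAct]

theorem pv_active_sorted (mask : List (List Int)) (x : Nat) :
    ((List.range mask.length).filter (fun y => (mask.getD y []).getD x 0 != 0)).Pairwise (· < ·) :=
  List.Pairwise.filter _ List.pairwise_lt_range

theorem pv_find_max {p : Nat → Bool} :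
    ∀ {l : List Nat}, l.Pairwise (· > ·) → ∀ {m : Nat}, l.find? p = some m →
      ∀ c ∈ l, p c = true → c ≤ m := by
  intro l
  induction l with
  | nil => intro _ m h; cases h
  | cons x xs ih =>
    intro hp m hfind c hc hpc
    rcases List.pairwise_cons.mp hp with ⟨hgt, hptail⟩
    cases hpx : p x with
    | true =>
      rw [List.find?_cons_of_pos hpx] at hfind
      cases hfind
      rcases List.mem_cons.mp hc with rfl | hc'
      · exact le_refl _
      · exact (hgt c hc').le
    | false =>
      rw [List.find?_cons_of_neg (by simp [hpx])] at hfind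
      rcases List.mem_cons.mp hc with rfl | hc'
      · rw [hpc] at hpx; cases hpx
      · exact ih hptail hfind c hc' hpc

-- ===== B-side lemmas =====

-- last active row strictly below Y in column x, as an Int (-1 = none)
def pvLast (mask : List (List Int)) (x Y : Nat) : Int :=
  match (List.range Y).reverse.find? (fun a => pvAct mask x a) with
  | none => -1
  | some a => (a : Int)

-- the fill condition Source B tests when column x of row y is active with last-active prev
abbrev pvCnew (g : Int) (y : Nat) (prev : Int) (y' : Nat) : Prop :=
  0 ≤ prev ∧ 1 < (y : Int) - prev ∧ (y : Int) - prev ≤ g + 1 ∧ prev.toNat < y' ∧ y' < y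

-- "cell (y', x) has been filled by some consecutive active pair whose lower row is < Y"
abbrev pvW (mask : List (List Int)) (g : Int) (x y' Y : Nat) : Prop :=
  ∃ p ∈ pvPairs mask x, (1 < (p.2 : Int) - (p.1 : Int) ∧ (p.2 : Int) - (p.1 : Int) ≤ g + 1) ∧
    p.1 < y' ∧ y' < p.2 ∧ p.2 < Y

theorem pvLast_succ (mask : List (List Int)) (x Y : Nat) :
    pvLast mask x (Y + 1) = if pvAct mask x Y then (Y : Int) else pvLast mask x Y := by
  unfold pvLast
  rw [List.range_succ, List.reverse_append]
  cases h : pvAct mask x Y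
  · simp [h]
  · simp [h]

theorem pvLast_cases (mask : List (List Int)) (x Y : Nat) :
    pvLast mask x Y = -1 ∨
      (0 ≤ pvLast mask x Y ∧ pvAct mask x (pvLast mask x Y).toNat = true ∧ (pvLast mask x Y).toNat < Y) := by
  unfold pvLast
  rcases hf : (List.range Y).reverse.find? (fun a => pvAct mask x a) with _ | a
  · exact Or.inl rfl
  · refine Or.inr ⟨by positivity, ?_, ?_⟩
    · rw [Int.toNat_natCast]
      exact List.find?_some hf
    · rw [Int.toNat_natCast]
      exact List.mem_range.mp (List.mem_reverse.mp (List.mem_of_find?_eq_some hf))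

theorem pvLast_greatest (mask : List (List Int)) (x Y : Nat) :
    ∀ c, c < Y → pvAct mask x c = true → (c : Int) ≤ pvLast mask x Y := by
  intro c hc hact
  unfold pvLast
  rcases hf : (List.range Y).reverse.find? (fun a => pvAct mask x a) with _ | a
  · exact absurd hact (List.find?_eq_none.mp hf c (List.mem_reverse.mpr (List.mem_range.mpr hc)))
  · show (c : Int) ≤ (a : Int)
    exact_mod_cast pv_find_max (List.pairwise_reverse.mpr List.pairwise_lt_range) hf c
      (List.mem_reverse.mpr (List.mem_range.mpr hc)) hact

theorem pvLast_of (mask : List (List Int)) (x Y a : Nat) (haY : a < Y) (hact : pvAct mask x a = true)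
    (hmax : ∀ c, a < c → c < Y → pvAct mask x c = false) : pvLast mask x Y = (a : Int) := by
  have hge := pvLast_greatest mask x Y a haY hact
  rcases pvLast_cases mask x Y with h | ⟨h0, hact', hlt⟩
  · rw [h] at hge; omega
  · have htn : ((pvLast mask x Y).toNat : Int) = pvLast mask x Y := Int.toNat_of_nonneg h0
    rcases Nat.lt_trichotomy a (pvLast mask x Y).toNat with hlt2 | heq | hgt
    · rw [hmax _ hlt2 hlt] at hact'; cases hact'
    · omega
    · omega

theorem pvW_succ (mask : List (List Int)) (g : Int) (x y' Y : Nat) (hY : Y < mask.length) :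
    pvW mask g x y' (Y + 1) ↔
      pvW mask g x y' Y ∨ (pvAct mask x Y = true ∧ pvCnew g Y (pvLast mask x Y) y') := by
  constructor
  · rintro ⟨p, hp, hcond, h1, h2, hlt⟩
    by_cases hb : p.2 < Y
    · exact Or.inl ⟨p, hp, hcond, h1, h2, hb⟩
    · have hb2 : p.2 = Y := by omega
      right
      obtain ⟨a, b⟩ := p
      simp only at hb2 h1 h2 hcond
      subst hb2
      have hadj := (pv_zip_adj (pv_active_sorted mask x)).mp hp
      rcases hadj with ⟨ha, hbm, hab, hnb⟩
      rcases (pv_mem_active mask x a).mp ha with ⟨haY', haact⟩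
      rcases (pv_mem_active mask x b).mp hbm with ⟨hbY', hbact⟩
      have hlastf : pvLast mask x b = (a : Int) := by
        apply pvLast_of mask x b a hab haact
        intro c hac hcb
        cases hcact : pvAct mask x c
        · rfl
        · exact absurd ⟨hac, hcb⟩ (hnb c ((pv_mem_active mask x c).mpr ⟨by omega, hcact⟩))
      refine ⟨hbact, ?_⟩
      rw [hlastf]
      refine ⟨by positivity, hcond.1, hcond.2, ?_, h2⟩
      rw [Int.toNat_natCast]; exact h1
  · rintro (⟨p, hp, hcond, h1, h2, hlt⟩ | ⟨hact, h0, hgt, hle, h1, h2⟩)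
    · exact ⟨p, hp, hcond, h1, h2, by omega⟩
    · set prev := pvLast mask x Y with hprev
      rcases pvLast_cases mask x Y with hneg | ⟨h0', hpact, hpY⟩
      · rw [← hprev] at hneg; omega
      · have htn : ((prev.toNat : Nat) : Int) = prev := Int.toNat_of_nonneg h0
        have hpair : (prev.toNat, Y) ∈ pvPairs mask x := by
          apply (pv_zip_adj (pv_active_sorted mask x)).mpr
          refine ⟨(pv_mem_active mask x prev.toNat).mpr ⟨by omega, hpact⟩,
            (pv_mem_active mask x Y).mpr ⟨hY, hact⟩, by omega, ?_⟩
          rintro c hc ⟨hac, hcY⟩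
          rcases (pv_mem_active mask x c).mp hc with ⟨-, hcact⟩
          have := pvLast_greatest mask x Y c hcY hcact
          omega
        exact ⟨(prev.toNat, Y), hpair, ⟨by simp only []; omega, by simp only []; omega⟩,
          h1, h2, by omega⟩

theorem pvB_stepx_fst_cell (row : List Int) (g : Int) (y : Nat)
    (s : List (List Int) × List Int) (x y' x' : Nat) :
    pvCell (pvBStepX row g y s x).1 y' x' =
      if x' = x ∧ (row.getD x 0 != 0) = true ∧ pvCnew g y (s.2.getD x (-1)) y' ∧ x < pvRows s.1 y'
      then 1 else pvCell s.1 y' x' := by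
  unfold pvBStepX
  by_cases ha : (row.getD x 0 != 0) = true
  · rw [if_pos ha]
    show pvCell (if 0 ≤ s.2.getD x (-1) ∧ 1 < (y : Int) - s.2.getD x (-1) ∧ (y : Int) - s.2.getD x (-1) ≤ g + 1 then
        (List.range' ((s.2.getD x (-1)).toNat + 1) (y - (s.2.getD x (-1)).toNat - 1)).foldl (fun o yy => pvWrite o yy x) s.1
      else s.1) y' x' = _
    set prev := s.2.getD x (-1) with hprev
    by_cases hc : 0 ≤ prev ∧ 1 < (y : Int) - prev ∧ (y : Int) - prev ≤ g + 1
    · rw [if_pos hc, pv_rfold_cell]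
      have htn : ((prev.toNat : Nat) : Int) = prev := Int.toNat_of_nonneg hc.1
      refine if_congr ⟨?_, ?_⟩ rfl rfl
      · rintro ⟨rfl, hl, hu, hr⟩
        exact ⟨rfl, ha, ⟨hc.1, hc.2.1, hc.2.2, by omega, by omega⟩, hr⟩
      · rintro ⟨rfl, -, ⟨-, -, -, hl, hu⟩, hr⟩
        exact ⟨rfl, by omega, by omega, hr⟩
    · rw [if_neg hc, if_neg]
      rintro ⟨rfl, -, ⟨hc1, hc2, hc3, -, -⟩, -⟩
      exact hc ⟨hc1, hc2, hc3⟩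
  · rw [if_neg ha]
    have hn : ¬(x' = x ∧ (row.getD x 0 != 0) = true ∧ pvCnew g y (s.2.getD x (-1)) y' ∧ x < pvRows s.1 y') :=
      fun h => ha h.2.1
    rw [if_neg hn]

theorem pvB_stepx_fst_rows (row : List Int) (g : Int) (y : Nat)
    (s : List (List Int) × List Int) (x y' : Nat) :
    pvRows (pvBStepX row g y s x).1 y' = pvRows s.1 y' := by
  unfold pvBStepX
  split
  · show pvRows (if 0 ≤ s.2.getD x (-1) ∧ 1 < (y : Int) - s.2.getD x (-1) ∧ (y : Int) - s.2.getD x (-1) ≤ g + 1 then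
        (List.range' ((s.2.getD x (-1)).toNat + 1) (y - (s.2.getD x (-1)).toNat - 1)).foldl (fun o yy => pvWrite o yy x) s.1
      else s.1) y' = pvRows s.1 y'
    split
    · exact pv_rfold_rows _ _ _ _ _
    · rfl
  · rfl

theorem pvB_stepx_fst_len (row : List Int) (g : Int) (y : Nat)
    (s : List (List Int) × List Int) (x : Nat) :
    (pvBStepX row g y s x).1.length = s.1.length := by
  unfold pvBStepX
  split
  · show (if 0 ≤ s.2.getD x (-1) ∧ 1 < (y : Int) - s.2.getD x (-1) ∧ (y : Int) - s.2.getD x (-1) ≤ g + 1 then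
        (List.range' ((s.2.getD x (-1)).toNat + 1) (y - (s.2.getD x (-1)).toNat - 1)).foldl (fun o yy => pvWrite o yy x) s.1
      else s.1).length = s.1.length
    split
    · exact pv_rfold_len _ _ _ _
    · rfl
  · rfl

theorem pvB_stepx_snd (row : List Int) (g : Int) (y : Nat)
    (s : List (List Int) × List Int) (x x' : Nat) :
    (pvBStepX row g y s x).2.getD x' (-1) =
      if x' = x ∧ (row.getD x 0 != 0) = true ∧ x < s.2.length then (y : Int)
      else s.2.getD x' (-1) := by
  unfold pvBStepX
  by_cases ha : (row.getD x 0 != 0) = true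
  · rw [if_pos ha]
    show (s.2.set x (y : Int)).getD x' (-1) = _
    rw [pv_set_getD]
    exact if_congr ⟨fun h => ⟨h.1, ha, h.2⟩, fun h => ⟨h.1, h.2.2⟩⟩ rfl rfl
  · rw [if_neg ha, if_neg (fun h => ha h.2.1)]

theorem pvB_stepx_snd_len (row : List Int) (g : Int) (y : Nat)
    (s : List (List Int) × List Int) (x : Nat) :
    (pvBStepX row g y s x).2.length = s.2.length := by
  unfold pvBStepX
  split
  · exact List.length_set ..
  · rfl

theorem pvB_xfold_snd_len (row : List Int) (g : Int) (y : Nat) :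
    ∀ (xs : List Nat) (s : List (List Int) × List Int),
      (xs.foldl (pvBStepX row g y) s).2.length = s.2.length := by
  intro xs
  induction xs with
  | nil => intro s; rfl
  | cons x xs ih => intro s; rw [List.foldl_cons, ih, pvB_stepx_snd_len]

theorem pvB_xfold_fst_rows (row : List Int) (g : Int) (y : Nat) :
    ∀ (xs : List Nat) (s : List (List Int) × List Int) (y' : Nat),
      pvRows (xs.foldl (pvBStepX row g y) s).1 y' = pvRows s.1 y' := by
  intro xs
  induction xs with
  | nil => intro s y'; rfl
  | cons x xs ih => intro s y'; rw [List.foldl_cons, ih, pvB_stepx_fst_rows]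

theorem pvB_xfold_fst_len (row : List Int) (g : Int) (y : Nat) :
    ∀ (xs : List Nat) (s : List (List Int) × List Int),
      (xs.foldl (pvBStepX row g y) s).1.length = s.1.length := by
  intro xs
  induction xs with
  | nil => intro s; rfl
  | cons x xs ih => intro s; rw [List.foldl_cons, ih, pvB_stepx_fst_len]

theorem pvB_xfold_snd (row : List Int) (g : Int) (y : Nat) (x' : Nat) :
    ∀ (xs : List Nat), xs.Nodup → ∀ (s : List (List Int) × List Int),
      (xs.foldl (pvBStepX row g y) s).2.getD x' (-1) =
        if x' ∈ xs ∧ (row.getD x' 0 != 0) = true ∧ x' < s.2.length then (y : Int)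
        else s.2.getD x' (-1) := by
  intro xs
  induction xs with
  | nil => intro _ s; simp
  | cons x xs ih =>
    intro hnd s
    rcases List.nodup_cons.mp hnd with ⟨hxn, hnd'⟩
    rw [List.foldl_cons, ih hnd', pvB_stepx_snd_len, pvB_stepx_snd]
    by_cases hm : x' ∈ xs
    · have hne : x' ≠ x := fun h => hxn (h ▸ hm)
      by_cases hc : (row.getD x' 0 != 0) = true ∧ x' < s.2.length
      · rw [if_pos ⟨hm, hc.1, hc.2⟩, if_pos ⟨List.mem_cons_of_mem _ hm, hc⟩]
      · have h1 : ¬(x' ∈ xs ∧ (row.getD x' 0 != 0) = true ∧ x' < s.2.length) := fun h => hc ⟨h.2.1, h.2.2⟩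
        rw [if_neg h1]
        have hM : ¬(x' = x ∧ (row.getD x 0 != 0) = true ∧ x < s.2.length) := fun h => hne h.1
        rw [if_neg hM]
        have h2 : ¬(x' ∈ x :: xs ∧ (row.getD x' 0 != 0) = true ∧ x' < s.2.length) := fun h => hc ⟨h.2.1, h.2.2⟩
        rw [if_neg h2]
    · have h1 : ¬(x' ∈ xs ∧ (row.getD x' 0 != 0) = true ∧ x' < s.2.length) := fun h => hm h.1
      rw [if_neg h1]
      by_cases hx : x' = x
      · subst hx
        by_cases hc : (row.getD x' 0 != 0) = true ∧ x' < s.2.length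
        · rw [if_pos ⟨rfl, hc.1, hc.2⟩, if_pos ⟨List.mem_cons_self, hc⟩]
        · have hM : ¬(x' = x' ∧ (row.getD x' 0 != 0) = true ∧ x' < s.2.length) := fun h => hc ⟨h.2.1, h.2.2⟩
          rw [if_neg hM]
          have h2 : ¬(x' ∈ x' :: xs ∧ (row.getD x' 0 != 0) = true ∧ x' < s.2.length) := fun h => hc ⟨h.2.1, h.2.2⟩
          rw [if_neg h2]
      · have hM : ¬(x' = x ∧ (row.getD x 0 != 0) = true ∧ x < s.2.length) := fun h => hx h.1
        rw [if_neg hM]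
        have h2 : ¬(x' ∈ x :: xs ∧ (row.getD x' 0 != 0) = true ∧ x' < s.2.length) := by
          rintro ⟨h1', -⟩
          rcases List.mem_cons.mp h1' with rfl | hm'
          · exact hx rfl
          · exact hm hm'
        rw [if_neg h2]

theorem pvB_xfold_fst_cell (row : List Int) (g : Int) (y : Nat) (y' x' : Nat) :
    ∀ (xs : List Nat), xs.Nodup → ∀ (s : List (List Int) × List Int),
      pvCell (xs.foldl (pvBStepX row g y) s).1 y' x' =
        if x' ∈ xs ∧ (row.getD x' 0 != 0) = true ∧ pvCnew g y (s.2.getD x' (-1)) y' ∧ x' < pvRows s.1 y'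
        then 1 else pvCell s.1 y' x' := by
  intro xs
  induction xs with
  | nil => intro _ s; simp
  | cons x xs ih =>
    intro hnd s
    rcases List.nodup_cons.mp hnd with ⟨hxn, hnd'⟩
    rw [List.foldl_cons, ih hnd', pvB_stepx_fst_rows, pvB_stepx_snd, pvB_stepx_fst_cell]
    by_cases hm : x' ∈ xs
    · have hne : x' ≠ x := fun h => hxn (h ▸ hm)
      have hM0 : ¬(x' = x ∧ (row.getD x 0 != 0) = true ∧ x < s.2.length) := fun h => hne h.1
      rw [if_neg hM0]
      have hM1 : ¬(x' = x ∧ (row.getD x 0 != 0) = true ∧ pvCnew g y (s.2.getD x (-1)) y' ∧ x < pvRows s.1 y') :=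
        fun h => hne h.1
      rw [if_neg hM1]
      by_cases hc : (row.getD x' 0 != 0) = true ∧ pvCnew g y (s.2.getD x' (-1)) y' ∧ x' < pvRows s.1 y'
      · rw [if_pos ⟨hm, hc⟩, if_pos ⟨List.mem_cons_of_mem _ hm, hc⟩]
      · have h1 : ¬(x' ∈ xs ∧ (row.getD x' 0 != 0) = true ∧ pvCnew g y (s.2.getD x' (-1)) y' ∧ x' < pvRows s.1 y') :=
          fun h => hc h.2
        have h2 : ¬(x' ∈ x :: xs ∧ (row.getD x' 0 != 0) = true ∧ pvCnew g y (s.2.getD x' (-1)) y' ∧ x' < pvRows s.1 y') :=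
          fun h => hc h.2
        rw [if_neg h1, if_neg h2]
    · by_cases hx : x' = x
      · subst hx
        have hA : ¬(x' ∈ xs ∧ (row.getD x' 0 != 0) = true ∧
            pvCnew g y (if x' = x' ∧ (row.getD x' 0 != 0) = true ∧ x' < s.2.length then (y : Int) else s.2.getD x' (-1)) y' ∧
            x' < pvRows s.1 y') := fun h => hm h.1
        rw [if_neg hA]
        by_cases hc : (row.getD x' 0 != 0) = true ∧ pvCnew g y (s.2.getD x' (-1)) y' ∧ x' < pvRows s.1 y'
        · rw [if_pos ⟨rfl, hc.1, hc.2.1, hc.2.2⟩, if_pos ⟨List.mem_cons_self, hc⟩]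
        · have hM1 : ¬(x' = x' ∧ (row.getD x' 0 != 0) = true ∧ pvCnew g y (s.2.getD x' (-1)) y' ∧ x' < pvRows s.1 y') :=
            fun h => hc h.2
          have h2 : ¬(x' ∈ x' :: xs ∧ (row.getD x' 0 != 0) = true ∧ pvCnew g y (s.2.getD x' (-1)) y' ∧ x' < pvRows s.1 y') :=
            fun h => hc h.2
          rw [if_neg hM1, if_neg h2]
      · have hM0 : ¬(x' = x ∧ (row.getD x 0 != 0) = true ∧ x < s.2.length) := fun h => hx h.1
        rw [if_neg hM0]
        have hA : ¬(x' ∈ xs ∧ (row.getD x' 0 != 0) = true ∧ pvCnew g y (s.2.getD x' (-1)) y' ∧ x' < pvRows s.1 y') :=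
          fun h => hm h.1
        rw [if_neg hA]
        have hM1 : ¬(x' = x ∧ (row.getD x 0 != 0) = true ∧ pvCnew g y (s.2.getD x (-1)) y' ∧ x < pvRows s.1 y') :=
          fun h => hx h.1
        rw [if_neg hM1]
        have hT : ¬(x' ∈ x :: xs ∧ (row.getD x' 0 != 0) = true ∧ pvCnew g y (s.2.getD x' (-1)) y' ∧ x' < pvRows s.1 y') := by
          rintro ⟨h1', -⟩
          rcases List.mem_cons.mp h1' with rfl | hm'
          · exact hx rfl
          · exact hm hm'
        rw [if_neg hT]

-- state of Source B's sweep after the first Y rows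
def pvBState (mask : List (List Int)) (g : Int) (Y : Nat) : List (List Int) × List Int :=
  (List.range Y).foldl (pvBStepY mask g) (mask, List.replicate (pvWidth mask) (-1))

theorem pvBState_succ (mask : List (List Int)) (g : Int) (Y : Nat) :
    pvBState mask g (Y + 1) = pvBStepY mask g (pvBState mask g Y) Y := by
  unfold pvBState
  rw [List.range_succ, List.foldl_append, List.foldl_cons, List.foldl_nil]

theorem pvB_inv (mask : List (List Int)) (g : Int) :
    ∀ Y, Y ≤ mask.length →
      ((pvBState mask g Y).2.length = pvWidth mask) ∧
      (∀ x', x' < pvWidth mask → (pvBState mask g Y).2.getD x' (-1) = pvLast mask x' Y) ∧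
      (∀ y', pvRows (pvBState mask g Y).1 y' = pvRows mask y') ∧
      ((pvBState mask g Y).1.length = mask.length) ∧
      (∀ y' x', pvCell (pvBState mask g Y).1 y' x' =
        if x' < pvWidth mask ∧ pvW mask g x' y' Y ∧ x' < pvRows mask y' then 1
        else pvCell mask y' x') := by
  intro Y
  induction Y with
  | zero =>
    intro _
    refine ⟨List.length_replicate, ?_, fun y' => rfl, rfl, ?_⟩
    · intro x' hx'
      show (List.replicate (pvWidth mask) (-1 : Int)).getD x' (-1) = pvLast mask x' 0
      rw [List.getD_eq_getElem?_getD, List.getElem?_replicate]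
      simp [hx', pvLast]
    · intro y' x'
      rw [if_neg]
      · rfl
      · rintro ⟨-, ⟨p, -, -, -, -, hlt⟩, -⟩
        omega
  | succ Y ih =>
    intro hY1
    have hY : Y < mask.length := by omega
    rcases ih (by omega) with ⟨hlen2, hsnd, hrows, hlen1, hcell⟩
    have hstep : pvBState mask g (Y + 1) =
        (List.range (pvWidth mask)).foldl (pvBStepX (mask.getD Y []) g Y) (pvBState mask g Y) := by
      rw [pvBState_succ]; rfl
    have hactrw : ∀ x' : Nat, ((mask.getD Y []).getD x' 0 != 0) = pvAct mask x' Y := fun _ => rfl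
    refine ⟨?_, ?_, ?_, ?_, ?_⟩
    · rw [hstep, pvB_xfold_snd_len, hlen2]
    · intro x' hx'
      rw [hstep, pvB_xfold_snd _ _ _ _ _ (List.nodup_range) _, hlen2, hsnd x' hx', hactrw,
        pvLast_succ]
      cases h : pvAct mask x' Y
      · rw [if_neg (by rintro ⟨-, hh, -⟩; cases hh), if_neg (by simp)]
      · rw [if_pos ⟨List.mem_range.mpr hx', rfl, hx'⟩, if_pos rfl]
    · intro y'
      rw [hstep, pvB_xfold_fst_rows, hrows]
    · rw [hstep, pvB_xfold_fst_len, hlen1]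
    · intro y' x'
      rw [hstep, pvB_xfold_fst_cell _ _ _ _ _ _ (List.nodup_range) _, hrows, hcell, hactrw]
      by_cases hw : x' < pvWidth mask
      · by_cases hr : x' < pvRows mask y'
        · rw [hsnd x' hw]
          have hWs := pvW_succ mask g x' y' Y hY
          by_cases hn : pvAct mask x' Y = true ∧ pvCnew g Y (pvLast mask x' Y) y'
          · rw [if_pos ⟨List.mem_range.mpr hw, hn.1, hn.2, hr⟩,
              if_pos ⟨hw, hWs.mpr (Or.inr hn), hr⟩]
          · rw [if_neg (fun h => hn ⟨h.2.1, h.2.2.1⟩)]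
            by_cases hWY : pvW mask g x' y' Y
            · rw [if_pos ⟨hw, hWY, hr⟩, if_pos ⟨hw, hWs.mpr (Or.inl hWY), hr⟩]
            · rw [if_neg (fun h => hWY h.2.1), if_neg]
              rintro ⟨-, hW1, -⟩
              rcases hWs.mp hW1 with h | h
              · exact hWY h
              · exact hn h
        · rw [if_neg (fun h => hr h.2.2.2), if_neg (fun h => hr h.2.2), if_neg (fun h => hr h.2.2)]
      · rw [if_neg (fun h => hw (List.mem_range.mp h.1)), if_neg (fun h => hw h.1),
          if_neg (fun h => hw h.1)]

theorem pv_B_eq (mask : List (List Int)) (g : Int) :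
    fill_vertical_gaps_alt mask g = (pvBState mask g mask.length).1 := rfl

theorem pv_B_len (mask : List (List Int)) (g : Int) :
    (fill_vertical_gaps_alt mask g).length = mask.length := by
  rw [pv_B_eq]
  exact (pvB_inv mask g mask.length (le_refl _)).2.2.2.1

theorem pv_B_rows (mask : List (List Int)) (g : Int) (y : Nat) :
    pvRows (fill_vertical_gaps_alt mask g) y = pvRows mask y := by
  rw [pv_B_eq]
  exact (pvB_inv mask g mask.length (le_refl _)).2.2.1 y

theorem pv_pairs_snd_lt (mask : List (List Int)) (x : Nat) (p : Nat × Nat)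
    (hp : p ∈ pvPairs mask x) : p.2 < mask.length := by
  obtain ⟨a, b⟩ := p
  have hb := (List.of_mem_zip hp).2
  exact ((pv_mem_active mask x b).mp (List.mem_of_mem_tail hb)).1

theorem pv_B_cell (mask : List (List Int)) (g : Int) (y x : Nat) :
    pvCell (fill_vertical_gaps_alt mask g) y x =
      if x < pvWidth mask ∧
          (∃ p ∈ pvPairs mask x, (1 < (p.2 : Int) - (p.1 : Int) ∧ (p.2 : Int) - (p.1 : Int) ≤ g + 1) ∧ p.1 < y ∧ y < p.2) ∧
          x < pvRows mask y
      then 1 else pvCell mask y x := by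
  rw [pv_B_eq, (pvB_inv mask g mask.length (le_refl _)).2.2.2.2 y x]
  refine if_congr (and_congr_right fun _ => and_congr_left fun _ => ?_) rfl rfl
  constructor
  · rintro ⟨p, hp, hc, h1, h2, -⟩
    exact ⟨p, hp, hc, h1, h2⟩
  · rintro ⟨p, hp, hc, h1, h2⟩
    exact ⟨p, hp, hc, h1, h2, pv_pairs_snd_lt mask x p hp⟩

-- ===== VERDICT helper =====
theorem pv_AB (mask : List (List Int)) (g : Int) :
    fill_vertical_gaps mask g = fill_vertical_gaps_alt mask g := by
  apply List.ext_getElem (by rw [pv_A_len, pv_B_len])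
  intro y hyA hyB
  have hy : y < mask.length := by rw [pv_A_len] at hyA; exact hyA
  have hAr : (fill_vertical_gaps mask g).getD y [] = (fill_vertical_gaps mask g)[y] :=
    pv_getD_getElem _ _ _ hyA
  have hBr : (fill_vertical_gaps_alt mask g).getD y [] = (fill_vertical_gaps_alt mask g)[y] :=
    pv_getD_getElem _ _ _ hyB
  have hArl : (fill_vertical_gaps mask g)[y].length = pvRows mask y := by
    have h := pv_A_rows mask g y
    unfold pvRows at h ⊢
    rw [hAr] at h
    exact h
  have hBrl : (fill_vertical_gaps_alt mask g)[y].length = pvRows mask y := by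
    have h := pv_B_rows mask g y
    unfold pvRows at h ⊢
    rw [hBr] at h
    exact h
  apply List.ext_getElem (by rw [hArl, hBrl])
  intro x hxA hxB
  have hxr : x < pvRows mask y := by rw [hArl] at hxA; exact hxA
  have hAc : (fill_vertical_gaps mask g)[y][x] = pvCell (fill_vertical_gaps mask g) y x := by
    unfold pvCell
    rw [hAr, pv_getD_getElem _ _ _ hxA]
  have hBc : (fill_vertical_gaps_alt mask g)[y][x] = pvCell (fill_vertical_gaps_alt mask g) y x := by
    unfold pvCell
    rw [hBr, pv_getD_getElem _ _ _ hxB]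
  rw [hAc, hBc, pv_A_cell, pv_B_cell]

-- ===== VERDICT (by name: the statement is the Claim_ definition above) =====
theorem fill_vertical_gaps_spec : Claim_equal_fill_vertical_gaps := by
  unfold Claim_equal_fill_vertical_gaps
  intro mask g _hdom _hpre
  unfold Spec_fill_vertical_gaps
  exact pv_AB mask g
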